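-- pv_equiv track=rewrite | github.com/Tansuo2021/OCRPDF-TO-PPT | main.py | _extract_runs_1d
-- ===== SOURCE A (Python) =====
-- def _extract_runs_1d(mask_line):
--     runs = []
--     start = None
--     for idx, val in enumerate(mask_line):
--         if bool(val):
--             if start is None:
--                 start = idx
--         elif start is not None:
--             runs.append((start, idx - 1))
--             start = None
--     if start is not None:
--         runs.append((start, len(mask_line) - 1))
--     return runs
-- ===== SOURCE B (Python) =====
-- from itertools import groupby
--
-- def _extract_runs_1d(mask_line):
--     runs = []
--     idx = 0
--     for key, group in groupby(mask_line, key=bool):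
--         length = sum(1 for _ in group)
--         if key:
--             runs.append((idx, idx + length - 1))
--         idx += length
--     return runs
-- ===== Notes on version B (the rewrite author's own statement) =====
-- stated objective: idiomatic
-- what changed: Replaces the start=None sentinel state machine with itertools.groupby over bool: run boundaries are computed from group lengths and a running index, with no per-transition flush.
import Mathlib
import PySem

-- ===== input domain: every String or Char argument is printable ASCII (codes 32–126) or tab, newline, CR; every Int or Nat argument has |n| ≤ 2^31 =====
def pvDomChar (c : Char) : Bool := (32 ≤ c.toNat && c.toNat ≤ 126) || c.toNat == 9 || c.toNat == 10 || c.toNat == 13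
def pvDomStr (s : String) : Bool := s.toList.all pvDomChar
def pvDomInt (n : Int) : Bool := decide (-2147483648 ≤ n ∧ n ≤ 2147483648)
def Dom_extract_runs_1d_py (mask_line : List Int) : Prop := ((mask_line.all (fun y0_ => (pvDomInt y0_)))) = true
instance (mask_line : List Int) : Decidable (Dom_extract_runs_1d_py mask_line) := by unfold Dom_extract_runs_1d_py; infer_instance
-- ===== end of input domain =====

-- B replaces A's start=None sentinel state machine with a groupby-style scan: run
-- boundaries are computed from maximal-group lengths and a running index (idiomatic).


-- ===== PORT A =====
-- loop body of A: state is (runs, start)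
def extractRunsStep (acc : List (Int × Int) × Option Int) (p : Int × Int) :
    List (Int × Int) × Option Int :=
  if p.2 ≠ 0 then
    match acc.2 with
    | none => (acc.1, some p.1)
    | some _ => acc
  else
    match acc.2 with
    | some s => (acc.1 ++ [(s, p.1 - 1)], none)
    | none => acc

def extract_runs_1d_py (mask_line : List Int) : List (Int × Int) :=
  let st := (PySem.List.enumerate mask_line).foldl extractRunsStep ([], none)
  match st.2 with
  | some s => st.1 ++ [(s, (mask_line.length : Int) - 1)]
  | none => st.1

-- ===== PORT B =====
-- groupby-style: peel off the maximal group with the same truthiness key as the head,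
-- compute its length, emit a run if the key is truthy, advance the running index.
def altGo (xs : List Int) (idx : Int) : List (Int × Int) :=
  match xs with
  | [] => []
  | x :: rest =>
    let key := decide (x ≠ 0)
    let grp := rest.takeWhile (fun y => decide (y ≠ 0) == key)
    let rest' := rest.dropWhile (fun y => decide (y ≠ 0) == key)
    let len : Int := 1 + grp.length
    (if key then [(idx, idx + len - 1)] else []) ++ altGo rest' (idx + len)
termination_by xs.length
decreasing_by
  simpa using Nat.lt_succ_of_le (List.length_dropWhile_le _ _)

def extract_runs_1d_py_alt (mask_line : List Int) : List (Int × Int) := altGo mask_line 0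

-- ===== PRECONDITION & SPEC =====
def Spec_extract_runs_1d_py (mask_line : List Int) (out : List (Int × Int)) : Prop := out = extract_runs_1d_py_alt mask_line
instance (mask_line : List Int) (out : List (Int × Int)) : Decidable (Spec_extract_runs_1d_py mask_line out) := by unfold Spec_extract_runs_1d_py; infer_instance

-- ===== CLAIM (what is proved, stated in full; the proofs are below) =====
def Claim_equal_extract_runs_1d_py : Prop := ∀ (mask_line : List Int), Dom_extract_runs_1d_py mask_line → Spec_extract_runs_1d_py mask_line (extract_runs_1d_py mask_line)

-- ===== LEMMAS AND PROOFS =====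

-- reference per-element recursion both ports are reduced to
def specRec : List Int → Int → Option Int → List (Int × Int)
  | [], _, none => []
  | [], idx, some s => [(s, idx - 1)]
  | x :: xs, idx, st =>
    if x ≠ 0 then
      match st with
      | none => specRec xs (idx + 1) (some idx)
      | some _ => specRec xs (idx + 1) st
    else
      match st with
      | none => specRec xs (idx + 1) none
      | some s => (s, idx - 1) :: specRec xs (idx + 1) none

def finishAt (st : List (Int × Int) × Option Int) (endIdx : Int) : List (Int × Int) :=
  match st.2 with
  | some s => st.1 ++ [(s, endIdx - 1)]
  | none => st.1

theorem foldl_step_spec (xs : List Int) (n : Int) (runs : List (Int × Int)) (st : Option Int) :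
    finishAt ((PySem.List.enumerate xs n).foldl extractRunsStep (runs, st)) (n + xs.length)
      = runs ++ specRec xs n st := by
  induction xs generalizing n runs st with
  | nil =>
    cases st <;> simp [PySem.List.enumerate_nil, finishAt, specRec]
  | cons x xs ih =>
    rw [PySem.List.enumerate_cons]
    simp only [List.foldl_cons, extractRunsStep]
    have hlen : n + ((x :: xs).length : Int) = (n + 1) + (xs.length : Int) := by
      push_cast [List.length_cons]; ring
    rw [hlen]
    by_cases hx : x ≠ 0
    · simp only [if_pos hx]
      cases st with
      | none => rw [ih]; simp [specRec, hx]
      | some s => rw [ih]; simp [specRec, hx]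
    · simp only [if_neg hx]
      cases st with
      | none => rw [ih]; simp [specRec, hx]
      | some s => rw [ih]; simp [specRec, hx, List.append_assoc]

theorem specRec_truthy (t : List Int) (h : ∀ y ∈ t, y ≠ 0) (d : List Int) (m : Int) (s : Int) :
    specRec (t ++ d) m (some s) = specRec d (m + t.length) (some s) := by
  induction t generalizing m with
  | nil => simp
  | cons y t ih =>
    have hy := h y (by simp)
    simp only [List.cons_append, specRec, if_pos hy]
    rw [ih (fun z hz => h z (by simp [hz]))]
    congr 1
    push_cast [List.length_cons]; ring

theorem specRec_falsy (t : List Int) (h : ∀ y ∈ t, y = 0) (d : List Int) (m : Int) :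
    specRec (t ++ d) m none = specRec d (m + t.length) none := by
  induction t generalizing m with
  | nil => simp
  | cons y t ih =>
    have hy := h y (by simp)
    simp only [List.cons_append, specRec, hy]
    simp only [ne_eq, not_true_eq_false, if_false]
    rw [ih (fun z hz => h z (by simp [hz]))]
    congr 1
    push_cast [List.length_cons]; ring

-- pulling out the head of a closed-or-empty region: some-state = emit pair then none-state
theorem specRec_some_eq (d : List Int) (m s : Int)
    (hd : d = [] ∨ ∃ y d', d = y :: d' ∧ y = 0) :
    specRec d m (some s) = (s, m - 1) :: specRec d m none := by
  rcases hd with h | ⟨y, d', rfl, hy⟩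
  · subst h; simp [specRec]
  · simp [specRec, hy]

theorem altGo_eq_specRec : ∀ (xs : List Int) (idx : Int), altGo xs idx = specRec xs idx none
  | [], idx => by simp [altGo, specRec]
  | x :: rest, idx => by
    have ih := altGo_eq_specRec
      (rest.dropWhile (fun y => decide (y ≠ 0) == decide (x ≠ 0)))
      (idx + (1 + ((rest.takeWhile (fun y => decide (y ≠ 0) == decide (x ≠ 0))).length : Int)))
    rw [altGo, ih]
    by_cases hx : x ≠ 0
    · have hkey : decide (x ≠ 0) = true := by simp [hx]
      have hpred : (fun y => decide (y ≠ 0) == decide (x ≠ 0)) = (fun y : Int => decide (y ≠ 0)) := by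
        funext y; rw [hkey]; cases decide (y ≠ 0) <;> rfl
      rw [hpred, hkey, if_pos rfl]
      have htr : ∀ y ∈ rest.takeWhile (fun y => decide (y ≠ 0)), y ≠ 0 := by
        intro y hy
        simpa using List.mem_takeWhile_imp hy
      have hrest' : rest.dropWhile (fun y => decide (y ≠ 0)) = [] ∨
          ∃ y d', rest.dropWhile (fun y => decide (y ≠ 0)) = y :: d' ∧ y = 0 := by
        cases h : rest.dropWhile (fun y => decide (y ≠ 0)) with
        | nil => exact Or.inl rfl
        | cons y d' =>
          refine Or.inr ⟨y, d', rfl, ?_⟩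
          have := List.head?_dropWhile_not (p := fun y : Int => decide (y ≠ 0)) (l := rest)
          rw [h] at this
          simpa using this
      have hsr : specRec (x :: rest) idx none = specRec rest (idx + 1) (some idx) := by
        simp [specRec, hx]
      rw [hsr]
      conv_rhs => rw [← List.takeWhile_append_dropWhile
        (p := fun y : Int => decide (y ≠ 0)) (l := rest)]
      rw [specRec_truthy _ htr _ (idx + 1) idx, specRec_some_eq _ _ idx hrest']
      simp only [List.singleton_append]
      have harith : idx + (1 + ((rest.takeWhile (fun y : Int => decide (y ≠ 0))).length : Int))
          = idx + 1 + (rest.takeWhile (fun y : Int => decide (y ≠ 0))).length := by ring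
      rw [harith]
    · have hx0 : x = 0 := by omega
      have hkey : decide (x ≠ 0) = false := by simp [hx0]
      have hpred : (fun y => decide (y ≠ 0) == decide (x ≠ 0)) = (fun y : Int => decide (y = 0)) := by
        funext y; rw [hkey]; by_cases hy : y = 0 <;> simp [hy]
      rw [hpred, hkey, if_neg (by simp)]
      have hfa : ∀ y ∈ rest.takeWhile (fun y : Int => decide (y = 0)), y = 0 := by
        intro y hy
        simpa using List.mem_takeWhile_imp hy
      have hsr : specRec (x :: rest) idx none = specRec rest (idx + 1) none := by
        simp [specRec, hx0]
      rw [hsr]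
      conv_rhs => rw [← List.takeWhile_append_dropWhile
        (p := fun y : Int => decide (y = 0)) (l := rest)]
      rw [specRec_falsy _ hfa _ (idx + 1)]
      simp only [List.nil_append]
      congr 1
      ring
termination_by xs _ => xs.length
decreasing_by simpa using Nat.lt_succ_of_le (List.length_dropWhile_le _ _)

-- ===== VERDICT (by name: the statement is the Claim_ definition above) =====
theorem extract_runs_1d_py_spec : Claim_equal_extract_runs_1d_py := by
  intro mask_line _
  unfold Spec_extract_runs_1d_py extract_runs_1d_py extract_runs_1d_py_alt
  rw [altGo_eq_specRec]
  have hA := foldl_step_spec mask_line 0 [] none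
  simp only [zero_add, List.nil_append] at hA
  rw [← hA]
  rfl
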